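-- pv_equiv track=rewrite | github.com/wbsg-uni-mannheim/wdc-pave | pieutils/evaluation.py | calculate_evaluation_metrics
-- ===== SOURCE A (Python) =====
-- NN = 'nn'
--
-- NV = 'nv'
--
-- VN = 'vn'
--
-- VC = 'vc'
--
-- VW = 'vw'
--
-- def calculate_evaluation_metrics(targets, preds, categories, attributes, unique_category, unique_attribute):
--     """Calculate evaluation metrics (nn, nv, vn, vc, vw) for a specific attribute-category combination.
--
--     Args:
--         targets (list): List of target values.
--         preds (list): List of predicted values.
--         categories (list): List of categories.
--         attributes (list): List of attributes.
--         unique_category: The unique category to evaluate.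
--         unique_attribute: The unique attribute to evaluate.
--
--     Returns:
--         dict: A dictionary containing the counts of each evaluation metric.
--     """
--     eval_dict = {
--         NN: 0,
--         NV: 0,
--         VN: 0,
--         VC: 0,
--         VW: 0
--     }
--
--     for target, pred, category, attribute in zip(targets, preds, categories, attributes):
--         if unique_attribute != attribute or unique_category != category:
--             continue
--
--         target_values = [value.strip() if value != "n/a" else None for value in target]
--         prediction = pred if pred != "n/a" else None
--
--         if target_values[0] is None and prediction is None:
--             eval_dict[NN] += 1
--         elif target_values[0] is None and prediction is not None:
--             eval_dict[NV] += 1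
--         elif target_values[0] is not None and prediction is None:
--             eval_dict[VN] += 1
--         elif prediction in target_values:
--             eval_dict[VC] += 1
--         else:
--             eval_dict[VW] += 1
--
--     return eval_dict
-- ===== SOURCE B (Python) =====
-- NN = 'nn'
-- NV = 'nv'
-- VN = 'vn'
-- VC = 'vc'
-- VW = 'vw'
--
-- def _label(target, pred):
--     """Classify one matched (target, pred) record into its metric bucket."""
--     if target[0] == "n/a":
--         return NN if pred == "n/a" else NV
--     if pred == "n/a":
--         return VN
--     values = [v.strip() for v in target if v != "n/a"]
--     return VC if pred in values else VW
--
-- def calculate_evaluation_metrics(targets, preds, categories, attributes, unique_category, unique_attribute):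
--     matched = [(t, p) for t, p, c, a in zip(targets, preds, categories, attributes)
--                if a == unique_attribute and c == unique_category]
--     return {k: sum(1 for t, p in matched if _label(t, p) == k)
--             for k in (NN, NV, VN, VC, VW)}
-- ===== Notes on version B (the rewrite author's own statement) =====
-- stated objective: simpler
-- what changed: Replaces A's single loop mutating a five-key dict through an if/elif ladder by a filter of the matched records, a helper that classifies one record into its metric label, and a dict comprehension counting each label independently.
import Mathlib
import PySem

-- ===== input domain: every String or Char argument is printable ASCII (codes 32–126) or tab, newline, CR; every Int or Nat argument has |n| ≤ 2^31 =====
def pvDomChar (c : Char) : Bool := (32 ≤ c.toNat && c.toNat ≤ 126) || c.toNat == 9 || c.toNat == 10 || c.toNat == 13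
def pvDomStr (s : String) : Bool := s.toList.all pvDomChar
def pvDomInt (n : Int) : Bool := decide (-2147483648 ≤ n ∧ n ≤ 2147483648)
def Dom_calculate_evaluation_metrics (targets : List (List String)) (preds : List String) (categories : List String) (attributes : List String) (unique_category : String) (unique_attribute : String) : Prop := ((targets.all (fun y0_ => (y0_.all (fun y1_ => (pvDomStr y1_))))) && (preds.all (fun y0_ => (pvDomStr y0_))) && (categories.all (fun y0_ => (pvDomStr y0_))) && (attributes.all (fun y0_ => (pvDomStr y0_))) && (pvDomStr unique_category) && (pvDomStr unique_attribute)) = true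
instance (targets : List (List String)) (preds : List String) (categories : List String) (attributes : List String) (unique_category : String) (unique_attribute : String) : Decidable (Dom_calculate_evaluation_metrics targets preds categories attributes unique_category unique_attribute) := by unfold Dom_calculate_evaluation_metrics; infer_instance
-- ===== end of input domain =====

-- B replaces A's single fold-with-if/elif-ladder over a mutable dict by a filter of the matched
-- records, a record-classifying helper, and five independent counts (objective: simpler decomposition).

-- ===== PORT A =====
-- one iteration of A's loop body, acting on the dict state
def pvStepA (unique_category unique_attribute : String)
    (d : PySem.Dict String Int) (r : List String × String × String × String) :
    PySem.Dict String Int :=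
  let target := r.1; let pred := r.2.1; let category := r.2.2.1; let attr := r.2.2.2  -- 'attribute' is a Lean keyword
  if unique_attribute != attr || unique_category != category then d
  else
    let target_values : List (Option String) :=
      target.map (fun value => if value != "n/a" then some (PySem.Str.strip value) else none)
    let prediction : Option String := if pred != "n/a" then some pred else none
    match PySem.List.pyGet? target_values 0 with
    | none => d  -- Python raises IndexError here; excluded by Pre_
    | some h =>
      if h.isNone && prediction.isNone then d.modify "nn" 0 (· + 1)
      else if h.isNone && prediction.isSome then d.modify "nv" 0 (· + 1)
      else if h.isSome && prediction.isNone then d.modify "vn" 0 (· + 1)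
      else if prediction ∈ target_values then d.modify "vc" 0 (· + 1)
      else d.modify "vw" 0 (· + 1)  -- eval_dict[k] += 1 (key always present) = modify k 0 (+1)

def calculate_evaluation_metrics (targets : List (List String)) (preds : List String) (categories : List String) (attributes : List String) (unique_category : String) (unique_attribute : String) : List (String × Int) :=
  let eval_dict : PySem.Dict String Int :=
    PySem.Dict.mk [("nn", 0), ("nv", 0), ("vn", 0), ("vc", 0), ("vw", 0)]
  ((targets.zip (preds.zip (categories.zip attributes))).foldl
    (pvStepA unique_category unique_attribute) eval_dict).items

-- ===== PORT B =====
-- Source B's _label: classify one matched (target, pred) record into its metric bucket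
def pvLabel (target : List String) (pred : String) : String :=
  match PySem.List.pyGet? target 0 with
  | none => ""  -- Python raises IndexError here; excluded by Pre_
  | some v =>
    if v == "n/a" then (if pred == "n/a" then "nn" else "nv")
    else if pred == "n/a" then "vn"
    else
      let values := (target.filter (fun v => v != "n/a")).map PySem.Str.strip
      if pred ∈ values then "vc" else "vw"

def calculate_evaluation_metrics_alt (targets : List (List String)) (preds : List String) (categories : List String) (attributes : List String) (unique_category : String) (unique_attribute : String) : List (String × Int) :=
  let matched : List (List String × String) :=
    ((targets.zip (preds.zip (categories.zip attributes))).filter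
      (fun r => r.2.2.2 == unique_attribute && r.2.2.1 == unique_category)).map
      (fun r => (r.1, r.2.1))
  ["nn", "nv", "vn", "vc", "vw"].map
    (fun k => (k, (matched.countP (fun tp => pvLabel tp.1 tp.2 == k) : Int)))

-- ===== PRECONDITION & SPEC =====
-- Pre_ excludes inputs where some record matching the category/attribute filter has an EMPTY
-- target list: there both A and B raise IndexError (target_values[0] / target[0]).
def Pre_calculate_evaluation_metrics (targets : List (List String)) (preds : List String) (categories : List String) (attributes : List String) (unique_category : String) (unique_attribute : String) : Prop :=
  ∀ r ∈ targets.zip (preds.zip (categories.zip attributes)),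
    (r.2.2.2 = unique_attribute ∧ r.2.2.1 = unique_category) → r.1 ≠ []
instance (targets : List (List String)) (preds : List String) (categories : List String) (attributes : List String) (unique_category : String) (unique_attribute : String) : Decidable (Pre_calculate_evaluation_metrics targets preds categories attributes unique_category unique_attribute) := by unfold Pre_calculate_evaluation_metrics; infer_instance

def pvWitness_calculate_evaluation_metrics : List (List String) × List String × List String × List String × String × String :=
  ([["n/a"], ["x", "y"]], ["n/a", " x "], ["c", "c"], ["a", "a"], "c", "a")

def Spec_calculate_evaluation_metrics (targets : List (List String)) (preds : List String) (categories : List String) (attributes : List String) (unique_category : String) (unique_attribute : String) (out : List (String × Int)) : Prop := out = calculate_evaluation_metrics_alt targets preds categories attributes unique_category unique_attribute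
instance (targets : List (List String)) (preds : List String) (categories : List String) (attributes : List String) (unique_category : String) (unique_attribute : String) (out : List (String × Int)) : Decidable (Spec_calculate_evaluation_metrics targets preds categories attributes unique_category unique_attribute out) := by unfold Spec_calculate_evaluation_metrics; infer_instance

-- ===== CLAIM (what is proved, stated in full; the proofs are below) =====
def Claim_equal_calculate_evaluation_metrics : Prop := ∀ (targets : List (List String)) (preds : List String) (categories : List String) (attributes : List String) (unique_category : String) (unique_attribute : String), Dom_calculate_evaluation_metrics targets preds categories attributes unique_category unique_attribute → Pre_calculate_evaluation_metrics targets preds categories attributes unique_category unique_attribute → Spec_calculate_evaluation_metrics targets preds categories attributes unique_category unique_attribute (calculate_evaluation_metrics targets preds categories attributes unique_category unique_attribute)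

-- ===== LEMMAS AND PROOFS =====

-- the five-counter dict state A's loop maintains
def pvD (a b c d e : Int) : PySem.Dict String Int :=
  PySem.Dict.mk [("nn", a), ("nv", b), ("vn", c), ("vc", d), ("vw", e)]

def pvMatched (uc ua : String) (l : List (List String × String × String × String)) :
    List (List String × String) :=
  (l.filter (fun r => r.2.2.2 == ua && r.2.2.1 == uc)).map (fun r => (r.1, r.2.1))

def pvCnt (m : List (List String × String)) (k : String) : Int :=
  (m.countP (fun tp => pvLabel tp.1 tp.2 == k) : Int)

theorem pvD_modify_nn (a b c d e : Int) : (pvD a b c d e).modify "nn" 0 (· + 1) = pvD (a + 1) b c d e := by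
  simp [pvD, PySem.Dict.modify, PySem.Dict.contains, PySem.Dict.insert, PySem.Dict.getD, PySem.Dict.get?_mk_cons]
theorem pvD_modify_nv (a b c d e : Int) : (pvD a b c d e).modify "nv" 0 (· + 1) = pvD a (b + 1) c d e := by
  simp [pvD, PySem.Dict.modify, PySem.Dict.contains, PySem.Dict.insert, PySem.Dict.getD, PySem.Dict.get?_mk_cons]
theorem pvD_modify_vn (a b c d e : Int) : (pvD a b c d e).modify "vn" 0 (· + 1) = pvD a b (c + 1) d e := by
  simp [pvD, PySem.Dict.modify, PySem.Dict.contains, PySem.Dict.insert, PySem.Dict.getD, PySem.Dict.get?_mk_cons]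
theorem pvD_modify_vc (a b c d e : Int) : (pvD a b c d e).modify "vc" 0 (· + 1) = pvD a b c (d + 1) e := by
  simp [pvD, PySem.Dict.modify, PySem.Dict.contains, PySem.Dict.insert, PySem.Dict.getD, PySem.Dict.get?_mk_cons]
theorem pvD_modify_vw (a b c d e : Int) : (pvD a b c d e).modify "vw" 0 (· + 1) = pvD a b c d (e + 1) := by
  simp [pvD, PySem.Dict.modify, PySem.Dict.contains, PySem.Dict.insert, PySem.Dict.getD, PySem.Dict.get?_mk_cons]

theorem pvStepA_not_matched (uc ua : String) (d : PySem.Dict String Int)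
    (r : List String × String × String × String)
    (hm : (r.2.2.2 == ua && r.2.2.1 == uc) = false) :
    pvStepA uc ua d r = d := by
  have hc : (ua != r.2.2.2 || uc != r.2.2.1) = true := by
    simp only [Bool.and_eq_false_iff, beq_eq_false_iff_ne, ne_eq] at hm
    simp only [Bool.or_eq_true, bne_iff_ne, ne_eq]
    rcases hm with h | h
    · exact Or.inl (fun e => h e.symm)
    · exact Or.inr (fun e => h e.symm)
  unfold pvStepA
  rw [if_pos hc]

theorem pvStepA_matched (uc ua : String) (a b c d e : Int)
    (r : List String × String × String × String)
    (hm : (r.2.2.2 == ua && r.2.2.1 == uc) = true) (ht : r.1 ≠ []) :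
    pvStepA uc ua (pvD a b c d e) r =
      (if pvLabel r.1 r.2.1 == "nn" then pvD (a+1) b c d e
       else if pvLabel r.1 r.2.1 == "nv" then pvD a (b+1) c d e
       else if pvLabel r.1 r.2.1 == "vn" then pvD a b (c+1) d e
       else if pvLabel r.1 r.2.1 == "vc" then pvD a b c (d+1) e
       else pvD a b c d (e+1)) := by
  obtain ⟨t, p, cat, attr⟩ := r
  simp only [Bool.and_eq_true, beq_iff_eq] at hm
  obtain ⟨rfl, rfl⟩ := hm
  simp only at ht
  obtain ⟨v, rest, rfl⟩ := List.exists_cons_of_ne_nil ht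
  have hc : (attr != attr || cat != cat) = false := by simp
  unfold pvStepA pvLabel
  rw [if_neg (by simp)]
  simp only [List.map_cons, PySem.List.pyGet?, PySem.List.pyIdx?]
  by_cases hv : (v == "n/a") = true <;> by_cases hp : (p == "n/a") = true <;>
    simp only [hv, hp, bne, Bool.not_true, Bool.not_false, if_true] <;>
    simp [pvD_modify_nn, pvD_modify_nv, pvD_modify_vn, hv]
  have hiff : (p ∈ List.map PySem.Str.strip (List.filter (fun v => !v == "n/a") (v :: rest))) ↔
      (p = PySem.Str.strip v ∨ ∃ a ∈ rest, ¬a = "n/a" ∧ PySem.Str.strip a = p) := by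
    simp only [List.filter_cons, hv]
    simp
    tauto
  by_cases hmem : p = PySem.Str.strip v ∨ ∃ a ∈ rest, ¬a = "n/a" ∧ PySem.Str.strip a = p
  · have hm' := hiff.mpr hmem
    rcases hmem with h | h <;> simp only [if_pos hm'] <;> simp [h, pvD_modify_vc]
  · have hm' : ¬(p ∈ List.map PySem.Str.strip (List.filter (fun v => !v == "n/a") (v :: rest))) :=
      fun h => hmem (hiff.mp h)
    obtain ⟨hm1, hm2⟩ := not_or.mp hmem
    simp [hm1, hm2, hm', pvD_modify_vw]

theorem pvLabel_eq_vw (t : List String) (p : String) (ht : t ≠ [])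
    (h1 : pvLabel t p ≠ "nn") (h2 : pvLabel t p ≠ "nv") (h3 : pvLabel t p ≠ "vn")
    (h4 : pvLabel t p ≠ "vc") : pvLabel t p = "vw" := by
  obtain ⟨v, rest, rfl⟩ := List.exists_cons_of_ne_nil ht
  unfold pvLabel at *
  simp only [PySem.List.pyGet?, PySem.List.pyIdx?] at *
  split_ifs at * <;> simp_all

theorem foldA_eq (uc ua : String) (l : List (List String × String × String × String))
    (h : ∀ r ∈ l, (r.2.2.2 = ua ∧ r.2.2.1 = uc) → r.1 ≠ []) (a b c d e : Int) :
    l.foldl (pvStepA uc ua) (pvD a b c d e) =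
      pvD (a + pvCnt (pvMatched uc ua l) "nn") (b + pvCnt (pvMatched uc ua l) "nv")
        (c + pvCnt (pvMatched uc ua l) "vn") (d + pvCnt (pvMatched uc ua l) "vc")
        (e + pvCnt (pvMatched uc ua l) "vw") := by
  induction l generalizing a b c d e with
  | nil => simp [pvMatched, pvCnt]
  | cons r rs ih =>
    have hrec := fun a b c d e => ih (fun r hr hmr => h r (List.mem_cons_of_mem _ hr) hmr) a b c d e
    simp only [List.foldl_cons]
    by_cases hm : (r.2.2.2 == ua && r.2.2.1 == uc) = true
    · have ht : r.1 ≠ [] := h r List.mem_cons_self (by simpa using hm)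
      have hmat : pvMatched uc ua (r :: rs) = (r.1, r.2.1) :: pvMatched uc ua rs := by
        simp [pvMatched, hm]
      rw [pvStepA_matched uc ua a b c d e r hm ht]
      by_cases l1 : pvLabel r.1 r.2.1 = "nn"
      · simp only [l1, beq_iff_eq, String.reduceEq, reduceIte]
        rw [hrec]
        simp [pvD, pvCnt, hmat, List.countP_cons, l1]
        omega
      · by_cases l2 : pvLabel r.1 r.2.1 = "nv"
        · simp only [l2, beq_iff_eq, String.reduceEq, reduceIte]
          rw [hrec]
          simp [pvD, pvCnt, hmat, List.countP_cons, l1, l2]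
          omega
        · by_cases l3 : pvLabel r.1 r.2.1 = "vn"
          · simp only [l3, beq_iff_eq, String.reduceEq, reduceIte]
            rw [hrec]
            simp [pvD, pvCnt, hmat, List.countP_cons, l1, l2, l3]
            omega
          · by_cases l4 : pvLabel r.1 r.2.1 = "vc"
            · simp only [l4, beq_iff_eq, String.reduceEq, reduceIte]
              rw [hrec]
              simp [pvD, pvCnt, hmat, List.countP_cons, l1, l2, l3, l4]
              omega
            · have l5 := pvLabel_eq_vw r.1 r.2.1 ht l1 l2 l3 l4
              simp only [l5, beq_iff_eq, String.reduceEq, reduceIte]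
              rw [hrec]
              simp [pvD, pvCnt, hmat, List.countP_cons, l1, l2, l3, l4, l5]
              omega
    · have hmat : pvMatched uc ua (r :: rs) = pvMatched uc ua rs := by
        simp [pvMatched, eq_false_of_ne_true hm]
      rw [pvStepA_not_matched uc ua _ r (eq_false_of_ne_true hm), hrec, hmat]

-- ===== VERDICT (by name: the statement is the Claim_ definition above) =====
theorem calculate_evaluation_metrics_spec : Claim_equal_calculate_evaluation_metrics := by
  unfold Claim_equal_calculate_evaluation_metrics
  intro targets preds categories attributes uc ua _ hpre
  unfold Spec_calculate_evaluation_metrics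
  simp only [calculate_evaluation_metrics, calculate_evaluation_metrics_alt]
  have h2 := foldA_eq uc ua (targets.zip (preds.zip (categories.zip attributes))) hpre 0 0 0 0 0
  simp only [pvD] at h2
  rw [h2]
  simp [pvD, pvMatched, pvCnt, PySem.Dict.items]
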